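-- pv_equiv track=rewrite | github.com/toolchainlabs/toolchain-oss | src/python/toolchain/github_integration/management/commands/backfill_missing_issues.py | get_missing_issue_pages
-- ===== SOURCE A (Python) =====
-- from collections.abc import Iterator
--
-- def get_missing_issue_pages(existing_issues: list[int], page_size: int) -> tuple[int, ...]:
--     pages = []
--     latest_issue = 0
--     latest_page = 0
--     for from_issue, to_issue in find_gaps_iter(existing_issues):
--         from_issue_page = int((from_issue - 1) / page_size) + 1
--         if from_issue_page < latest_page:
--             continue
--         if latest_page >= from_issue_page:
--             from_issue_page = latest_page + 1
--         pages.append(from_issue_page)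
--         latest_issue = from_issue_page * page_size
--         latest_page = from_issue_page
--         while latest_issue < to_issue:
--             latest_page = int((latest_issue + 1) / page_size) + 1
--             pages.append(latest_page)
--             latest_issue += page_size
--     return tuple(pages)
--
-- def find_gaps_iter(existing_issues: list[int]) -> Iterator[tuple[int, int]]:
--     missing_issues = sorted(set(range(1, existing_issues[-1])).difference(existing_issues))
--     index = 0
--     cnt = len(missing_issues)
--     while index < cnt - 1:
--         offset = 0
--         low = missing_issues[index]
--         while cnt > (index + offset) and (missing_issues[index + offset] - low) <= offset:
--             offset += 1
--         yield low, missing_issues[index + offset - 1]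
--         index += offset
-- ===== SOURCE B (Python) =====
-- def get_missing_issue_pages(existing_issues, page_size):
--     # Derive the gap runs directly from the sorted distinct existing ids via a
--     # consecutive-difference scan, then emit each run's page span as an
--     # arithmetic range (ceiling division for the run's last page).
--     last = existing_issues[-1]
--     ids = sorted({x for x in existing_issues if 1 <= x < last})
--     bounds = [0] + ids + [last]
--     runs = [(p + 1, q - 1) for p, q in zip(bounds, bounds[1:]) if q - p >= 2]
--     pages = []
--     latest_page = 0
--     for a, b in runs:
--         p = (a - 1) // page_size + 1
--         if p < latest_page:
--             continue
--         if p == latest_page: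
--             p = latest_page + 1
--         q = max(p, -(-b // page_size))
--         pages.extend(range(p, q + 1))
--         latest_page = q
--     return tuple(pages)
-- ===== Notes on version B (the rewrite author's own statement) =====
-- stated objective: faster
-- what changed: B derives the gap runs directly from the sorted distinct existing ids by a consecutive-difference scan and emits each run's page span as an arithmetic range with a ceiling division, instead of materializing every integer up to the last id, grouping them with a double while loop, and stepping a per-page while loop.
-- intended difference: On inputs whose trailing maximal run of missing issue numbers has length one (A's gap iterator stops one element early and silently drops it, e.g. A returns () for existing [1,3]) or where page_size = 1 and two consecutive issues are missing (A's inner loop computes int((latest+1)/1)+1 = latest+2 and skips every other page, e.g. (2, 4) for existing [1,4]), A returns pages that fail to cover all missing issues, while B returns the pages that actually cover every gap run, which is the intended value for a backfill. — e.g. on get_missing_issue_pages([1, 4], 1): A returns [2, 4], B returns [2, 3]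
-- outside the precondition, e.g. on get_missing_issue_pages([-1, 2], -1): A returns (), B returns (1,); on get_missing_issue_pages([1, 3], 0): A returns (), B raises ZeroDivisionError; on get_missing_issue_pages([], 5): A raises IndexError, B raises IndexError
import Mathlib
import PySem

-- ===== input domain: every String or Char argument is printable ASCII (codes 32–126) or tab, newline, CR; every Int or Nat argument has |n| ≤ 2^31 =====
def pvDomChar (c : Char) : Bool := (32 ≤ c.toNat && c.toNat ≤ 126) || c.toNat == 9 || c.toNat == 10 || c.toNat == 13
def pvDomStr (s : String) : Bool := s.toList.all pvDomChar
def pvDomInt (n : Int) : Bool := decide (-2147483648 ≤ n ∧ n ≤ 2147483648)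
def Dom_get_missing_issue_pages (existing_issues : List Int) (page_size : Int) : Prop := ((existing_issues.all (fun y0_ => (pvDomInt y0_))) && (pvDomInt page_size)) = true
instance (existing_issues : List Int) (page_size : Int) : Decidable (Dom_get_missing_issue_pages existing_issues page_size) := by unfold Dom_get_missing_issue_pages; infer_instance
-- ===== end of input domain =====

-- B derives the gap runs from the sorted distinct existing ids (consecutive-difference scan)
-- and emits each run's page span as an arithmetic range, instead of enumerating every integer
-- up to the last id and stepping per-page while loops; on the D_ inputs below B's value
-- intentionally differs from A's.

-- ===== PORT A =====
-- sorted(set(range(1, existing_issues[-1])).difference(existing_issues));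
-- existing_issues[-1] is in range under Pre_ (list nonempty)
def pvA_missing (existing_issues : List Int) : List Int :=
  PySem.List.sorted
    (PySem.Set.diff
      (PySem.Set.ofList (PySem.List.pyRange 1 (PySem.List.pyGetD existing_issues (-1) 0)))
      existing_issues)
    (fun x => x)

-- termination measures for the while-loops (cited by name in decreasing_by)
theorem pv_dec_offset {a b : Nat} (h : a < b) : b - (a + 1) < b - a := by omega
theorem pv_dec_gaps {len i L : Nat} (h1 : 1 ≤ L) (h2 : i + 1 < len) :
    len - (i + L) < len - i := by omega
theorem pv_dec_inner {t l p : Int} (h1 : l < t) (h2 : 0 < p) :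
    (t - (l + p)).toNat < (t - l).toNat := by omega

-- inner while of find_gaps_iter: offset += 1 while cnt > index+offset and m[index+offset]-low <= offset
-- (list indices are always in range here, so getD is exact)
def pvA_offset (m : List Int) (index : Nat) (low : Int) (offset : Nat) : Nat :=
  if h : index + offset < m.length ∧ m.getD (index + offset) 0 - low ≤ (offset : Int) then
    pvA_offset m index low (offset + 1)
  else offset
termination_by m.length - (index + offset)
decreasing_by exact pv_dec_offset h.1

theorem pvA_offset_le (m : List Int) (index : Nat) (low : Int) :
    ∀ offset, offset ≤ pvA_offset m index low offset := by
  intro offset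
  induction offset using pvA_offset.induct m index low with
  | case1 o h ih => rw [pvA_offset, dif_pos h]; omega
  | case2 o h => rw [pvA_offset, dif_neg h]

theorem pvA_offset_zero_pos (m : List Int) (index : Nat) (h : index < m.length) :
    1 ≤ pvA_offset m index (m.getD index 0) 0 := by
  rw [pvA_offset, dif_pos ⟨by simpa using h, by simp⟩]
  exact pvA_offset_le m index _ 1

-- outer while of find_gaps_iter (yield collected into a list)
def pvA_gaps (m : List Int) (index : Nat) : List (Int × Int) :=
  if h : index + 1 < m.length then
    (m.getD index 0, m.getD (index + pvA_offset m index (m.getD index 0) 0 - 1) 0)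
      :: pvA_gaps m (index + pvA_offset m index (m.getD index 0) 0)
  else []
termination_by m.length - index
decreasing_by
  exact pv_dec_gaps (pvA_offset_zero_pos m index (Nat.lt_of_succ_lt h)) h

-- inner while of the main loop; the '0 < page_size' conjunct only makes the loop terminate in
-- Lean (Python diverges or raises for page_size ≤ 0, excluded by Pre_);
-- int((latest_issue+1)/page_size) is truncdiv, exact on |·| < 2^53
def pvA_inner (page_size to_issue : Int) (pages : List Int) (latest_issue latest_page : Int) :
    List Int × Int × Int :=
  if h : latest_issue < to_issue ∧ 0 < page_size then
    pvA_inner page_size to_issue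
      (pages ++ [PySem.Int.truncdiv (latest_issue + 1) page_size + 1])
      (latest_issue + page_size)
      (PySem.Int.truncdiv (latest_issue + 1) page_size + 1)
  else (pages, latest_issue, latest_page)
termination_by (to_issue - latest_issue).toNat
decreasing_by exact pv_dec_inner h.1 h.2

-- the 'for from_issue, to_issue in find_gaps_iter(...)' loop;
-- int((from_issue-1)/page_size) is truncdiv, exact on |·| < 2^53
def pvA_fold (page_size : Int) (gaps : List (Int × Int)) (pages : List Int)
    (latest_issue latest_page : Int) : List Int :=
  match gaps with
  | [] => pages
  | (from_issue, to_issue) :: rest =>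
    if PySem.Int.truncdiv (from_issue - 1) page_size + 1 < latest_page then
      pvA_fold page_size rest pages latest_issue latest_page
    else
      let fp := if latest_page ≥ PySem.Int.truncdiv (from_issue - 1) page_size + 1
                then latest_page + 1 else PySem.Int.truncdiv (from_issue - 1) page_size + 1
      let st := pvA_inner page_size to_issue (pages ++ [fp]) (fp * page_size) fp
      pvA_fold page_size rest st.1 st.2.1 st.2.2

def get_missing_issue_pages (existing_issues : List Int) (page_size : Int) : List Int :=
  pvA_fold page_size (pvA_gaps (pvA_missing existing_issues) 0) [] 0 0

-- ===== PORT B =====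
-- [(p + 1, q - 1) for p, q in zip(bounds, bounds[1:]) if q - p >= 2]   (bounds[1:] = tail)
def pvB_runs (bounds : List Int) : List (Int × Int) :=
  ((bounds.zip bounds.tail).filter (fun pq => 2 ≤ pq.2 - pq.1)).map (fun pq => (pq.1 + 1, pq.2 - 1))

-- the 'for a, b in runs' loop; -(-b // page_size) is the ceiling division
def pvB_emit (page_size : Int) (runs : List (Int × Int)) (pages : List Int) (latest_page : Int) :
    List Int :=
  match runs with
  | [] => pages
  | (a, b) :: rest =>
    if PySem.Int.floordiv (a - 1) page_size + 1 < latest_page then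
      pvB_emit page_size rest pages latest_page
    else
      let p := if PySem.Int.floordiv (a - 1) page_size + 1 = latest_page
               then latest_page + 1 else PySem.Int.floordiv (a - 1) page_size + 1
      let q := max p (-(PySem.Int.floordiv (-b) page_size))
      pvB_emit page_size rest (pages ++ PySem.List.pyRange p (q + 1)) q

def get_missing_issue_pages_alt (existing_issues : List Int) (page_size : Int) : List Int :=
  -- existing_issues[-1]: in range under Pre_ (list nonempty)
  let last := PySem.List.pyGetD existing_issues (-1) 0
  let ids := PySem.List.sorted
    (PySem.Set.ofList (existing_issues.filter (fun x => 1 ≤ x && x < last))) (fun x => x)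
  pvB_emit page_size (pvB_runs (0 :: ids ++ [last])) [] 0

-- ===== PRECONDITION & SPEC =====
-- Pre_ excludes empty existing_issues (A raises IndexError on existing_issues[-1]) and
-- page_size ≤ 0, on which A raises ZeroDivisionError or loops forever whenever a gap exists
-- and returns () only accidentally when there is none.
def Pre_get_missing_issue_pages (existing_issues : List Int) (page_size : Int) : Prop :=
  existing_issues ≠ [] ∧ 1 ≤ page_size
instance (existing_issues : List Int) (page_size : Int) :
    Decidable (Pre_get_missing_issue_pages existing_issues page_size) := by
  unfold Pre_get_missing_issue_pages; infer_instance

def pvWitness_get_missing_issue_pages : List Int × Int := ([1, 5], 2)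

-- On inputs whose trailing maximal run of missing issue numbers has length one (A's gap
-- iterator stops one element early and silently drops it, e.g. A returns [] for existing
-- [1, 3]) or where page_size = 1 and two consecutive issues are missing (A's inner loop
-- computes int((latest+1)/1)+1 = latest+2 and skips every other page, e.g. [2, 4] for
-- existing [1, 4]), A returns pages that fail to cover all missing issues, while B returns
-- the pages that actually cover every gap run, which is the intended value for a backfill.
def D_get_missing_issue_pages (existing_issues : List Int) (page_size : Int) : Prop :=
  (page_size = 1 ∧ ∃ v ∈ (0 :: existing_issues), 0 ≤ v ∧
      v + 2 < existing_issues.getLast?.getD 0 ∧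
      v + 1 ∉ existing_issues ∧ v + 2 ∉ existing_issues)
  ∨ (∃ u ∈ (0 :: existing_issues), 0 ≤ u ∧
      u + 1 < existing_issues.getLast?.getD 0 ∧ u + 1 ∉ existing_issues ∧
      ¬ ∃ v ∈ (((u + 1) : Int) :: existing_issues), u + 1 ≤ v ∧
        v + 1 < existing_issues.getLast?.getD 0 ∧ v + 1 ∉ existing_issues)
instance (existing_issues : List Int) (page_size : Int) :
    Decidable (D_get_missing_issue_pages existing_issues page_size) := by
  unfold D_get_missing_issue_pages; infer_instance

def Spec_get_missing_issue_pages (existing_issues : List Int) (page_size : Int) (out : List Int) : Prop :=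
  ¬ D_get_missing_issue_pages existing_issues page_size →
    out = get_missing_issue_pages_alt existing_issues page_size
instance (existing_issues : List Int) (page_size : Int) (out : List Int) :
    Decidable (Spec_get_missing_issue_pages existing_issues page_size out) := by
  unfold Spec_get_missing_issue_pages; infer_instance

def pvDiffWitness_get_missing_issue_pages : List Int × Int := ([1, 4], 1)
def pvDiffWitnessOut_get_missing_issue_pages : (List Int) × (List Int) := ([2, 4], [2, 3])

-- ===== CLAIM (what is proved, stated in full; the proofs are below) =====
def Claim_unchanged_get_missing_issue_pages : Prop := ∀ (existing_issues : List Int) (page_size : Int), Dom_get_missing_issue_pages existing_issues page_size → Pre_get_missing_issue_pages existing_issues page_size → Spec_get_missing_issue_pages existing_issues page_size (get_missing_issue_pages existing_issues page_size)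
def Claim_changed_get_missing_issue_pages : Prop := Dom_get_missing_issue_pages (pvDiffWitness_get_missing_issue_pages.1) (pvDiffWitness_get_missing_issue_pages.2) ∧ Pre_get_missing_issue_pages (pvDiffWitness_get_missing_issue_pages.1) (pvDiffWitness_get_missing_issue_pages.2) ∧ D_get_missing_issue_pages (pvDiffWitness_get_missing_issue_pages.1) (pvDiffWitness_get_missing_issue_pages.2) ∧ get_missing_issue_pages (pvDiffWitness_get_missing_issue_pages.1) (pvDiffWitness_get_missing_issue_pages.2) = pvDiffWitnessOut_get_missing_issue_pages.1 ∧ get_missing_issue_pages_alt (pvDiffWitness_get_missing_issue_pages.1) (pvDiffWitness_get_missing_issue_pages.2) = pvDiffWitnessOut_get_missing_issue_pages.2 ∧ pvDiffWitnessOut_get_missing_issue_pages.1 ≠ pvDiffWitnessOut_get_missing_issue_pages.2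

-- ===== LEMMAS AND PROOFS =====

-- the numbers in [1, existing_issues[-1]) that are not in existing_issues, ascending
def pvMissing (existing_issues : List Int) : List Int :=
  (PySem.List.pyRange 1 (PySem.List.pyGetD existing_issues (-1) 0)).filter
    (fun k => !existing_issues.contains k)

theorem pv_last_eq (ex : List Int) :
    PySem.List.pyGetD ex (-1) 0 = ex.getLast?.getD 0 := by
  cases hx : ex with
  | nil => rfl
  | cons y ys =>
    rw [PySem.List.pyGetD_neg_one _ _ (by simp), List.getLast?_eq_some_getLast (by simp)]
    rfl

-- maximal consecutive runs of an ascending integer list (reference used by both sides)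
def pvRunsGo (a b : Int) : List Int → List (Int × Int)
  | [] => [(a, b)]
  | y :: ys => if y = b + 1 then pvRunsGo a y ys else (a, b) :: pvRunsGo y y ys

def pvRunsOf : List Int → List (Int × Int)
  | [] => []
  | x :: xs => pvRunsGo x x xs

theorem pv_runsOf_cons (x : Int) (xs : List Int) : pvRunsOf (x :: xs) = pvRunsGo x x xs := rfl

-- the trailing-singleton trim that characterizes find_gaps_iter's early stop
def pvB_trim (runs : List (Int × Int)) : List (Int × Int) :=
  match runs.getLast? with
  | some r => if r.1 = r.2 then runs.dropLast else runs
  | none => runs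

theorem pv_tdiv_eq (a b : Int) (ha : 0 ≤ a) (hb : 0 < b) :
    PySem.Int.truncdiv a b = PySem.Int.floordiv a b := by
  simp [PySem.Int.truncdiv, Int.tdiv_eq_ediv_of_nonneg ha, PySem.Int.floordiv_eq_ediv_of_pos hb]

theorem pv_missing_eq (ex : List Int) : pvA_missing ex = pvMissing ex := by
  unfold pvA_missing pvMissing
  rw [PySem.Set.ofList_eq_self_of_nodup _ (PySem.List.nodup_pyRange_one _ _)]
  show PySem.List.sorted (List.filter _ _) _ = _
  rw [PySem.List.sorted_eq_self_of_pairwise _ _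
    (((PySem.List.pairwise_lt_pyRange_one _ _).filter _).imp (fun h => le_of_lt h))]
  simp

theorem pv_missing_sorted (ex : List Int) : (pvMissing ex).Pairwise (· < ·) := by
  exact (PySem.List.pairwise_lt_pyRange_one _ _).filter _

theorem pv_missing_one_le (ex : List Int) : ∀ k ∈ pvMissing ex, 1 ≤ k := by
  intro k hk
  exact (PySem.List.mem_pyRange_one.mp (List.mem_of_mem_filter hk)).1

theorem pv_getD_mono (m : List Int) (hs : m.Pairwise (· < ·)) (i j : Nat) (hij : i < j)
    (hj : j < m.length) : m.getD i 0 < m.getD j 0 := by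
  rw [List.getD_eq_getElem _ _ (by omega), List.getD_eq_getElem _ _ hj]
  exact List.pairwise_iff_getElem.mp hs i j (by omega) hj hij

theorem pv_offset_aux (m : List Int) (hs : m.Pairwise (· < ·)) (index : Nat) (low : Int) :
    ∀ (k : Nat), 1 ≤ k →
    (∀ j < k, index + j < m.length ∧ m.getD (index + j) 0 = low + j) →
    index + pvA_offset m index low k ≤ m.length ∧
    (∀ j < pvA_offset m index low k, m.getD (index + j) 0 = low + j) ∧
    (index + pvA_offset m index low k = m.length ∨
      low + pvA_offset m index low k < m.getD (index + pvA_offset m index low k) 0) := by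
  intro k
  induction k using pvA_offset.induct m index low with
  | case1 o h ih =>
    intro h1 hinv
    rw [pvA_offset, dif_pos h]
    have ho : m.getD (index + o) 0 = low + o := by
      have ha := hinv (o - 1) (by omega)
      have hb := pv_getD_mono m hs (index + (o - 1)) (index + o) (by omega) h.1
      have hc := h.2
      omega
    refine ih (by omega) ?_
    intro j hj
    by_cases hjo : j < o
    · exact hinv j hjo
    · have : j = o := by omega
      subst this
      exact ⟨h.1, ho⟩
  | case2 o h =>
    intro h1 hinv
    rw [pvA_offset, dif_neg h]
    have hlen : index + o ≤ m.length := by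
      have := (hinv (o - 1) (by omega)).1
      omega
    refine ⟨hlen, fun j hj => (hinv j hj).2, ?_⟩
    by_cases hl : index + o < m.length
    · right
      rcases not_and_or.mp h with h' | h'
      · exact absurd hl h'
      · omega
    · left; omega

-- the offset loop finds the length of the maximal consecutive run starting at index
theorem pv_offset_spec (m : List Int) (hs : m.Pairwise (· < ·)) (index : Nat)
    (hi : index < m.length) :
    1 ≤ pvA_offset m index (m.getD index 0) 0 ∧
    index + pvA_offset m index (m.getD index 0) 0 ≤ m.length ∧
    (∀ j < pvA_offset m index (m.getD index 0) 0,
      m.getD (index + j) 0 = m.getD index 0 + j) ∧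
    (index + pvA_offset m index (m.getD index 0) 0 = m.length ∨
      m.getD index 0 + pvA_offset m index (m.getD index 0) 0 <
        m.getD (index + pvA_offset m index (m.getD index 0) 0) 0) := by
  have h0 : pvA_offset m index (m.getD index 0) 0 = pvA_offset m index (m.getD index 0) 1 := by
    rw [pvA_offset, dif_pos ⟨by simpa using hi, by simp⟩]
  have haux := pv_offset_aux m hs index (m.getD index 0) 1 le_rfl
    (fun j hj => by
      have : j = 0 := by omega
      subst this
      exact ⟨by simpa using hi, by simp⟩)
  refine ⟨?_, ?_, ?_, ?_⟩
  · rw [h0]; exact pvA_offset_le m index _ 1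
  · rw [h0]; exact haux.1
  · rw [h0]; exact haux.2.1
  · rw [h0]; exact haux.2.2

theorem pv_runsGo_consec (rest : List Int) (a c b : Int) (hcb : c ≤ b)
    (hrest : ∀ y ∈ rest.head?, b + 1 < y) :
    pvRunsGo a c (PySem.List.pyRange (c + 1) (b + 1) ++ rest) = (a, b) :: pvRunsOf rest := by
  have stop : pvRunsGo a b rest = (a, b) :: pvRunsOf rest := by
    cases rest with
    | nil => simp [pvRunsGo, pvRunsOf]
    | cons y ys =>
      have hy : b + 1 < y := hrest y (by simp)
      simp only [pvRunsGo, pvRunsOf]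
      rw [if_neg (by omega)]
  have main : ∀ (n : Nat) (c : Int), c ≤ b → (b - c).toNat ≤ n →
      pvRunsGo a c (PySem.List.pyRange (c + 1) (b + 1) ++ rest) = (a, b) :: pvRunsOf rest := by
    intro n
    induction n with
    | zero =>
      intro c hc hn
      rw [show c = b from by omega, PySem.List.pyRange_one_eq_nil (by omega), List.nil_append]
      exact stop
    | succ n ih =>
      intro c hc hn
      by_cases hcb : c = b
      · rw [hcb, PySem.List.pyRange_one_eq_nil (by omega), List.nil_append]
        exact stop
      · rw [PySem.List.pyRange_one_cons (by omega), List.cons_append]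
        show (if c + 1 = c + 1 then pvRunsGo a (c+1) _ else _) = _
        rw [if_pos rfl]
        exact ih (c + 1) (by omega) (by omega)
  exact main (b - c).toNat c hcb (by omega)

theorem pv_runsOf_range (a b : Int) (h : a < b) :
    pvRunsOf (PySem.List.pyRange a b) = [(a, b - 1)] := by
  rw [PySem.List.pyRange_one_cons h]
  show pvRunsGo a a (PySem.List.pyRange (a + 1) b) = _
  have : PySem.List.pyRange (a + 1) b = PySem.List.pyRange (a + 1) ((b - 1) + 1) ++ [] := by
    norm_num
  rw [this, pv_runsGo_consec [] a a (b - 1) (by omega) (by simp)]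
  rfl

theorem pv_trim_cons (r : Int × Int) (rs : List (Int × Int)) (h : rs ≠ []) :
    pvB_trim (r :: rs) = r :: pvB_trim rs := by
  cases rs with
  | nil => exact absurd rfl h
  | cons b l =>
    unfold pvB_trim
    rw [List.getLast?_cons_cons]
    cases hg : (b :: l).getLast? with
    | none => simp at hg
    | some g => by_cases hgg : g.1 = g.2 <;> simp [hgg]

theorem pv_runsGo_ne_nil : ∀ (xs : List Int) (a b : Int), pvRunsGo a b xs ≠ [] := by
  intro xs
  induction xs with
  | nil => intro a b; simp [pvRunsGo]
  | cons y ys ih =>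
    intro a b
    unfold pvRunsGo
    by_cases hy : y = b + 1 <;> simp [hy, ih]

theorem pv_runsOf_ne_nil (xs : List Int) (h : xs ≠ []) : pvRunsOf xs ≠ [] := by
  cases xs with
  | nil => exact absurd rfl h
  | cons x t => exact pv_runsGo_ne_nil t x x

-- find_gaps_iter yields exactly the consecutive runs, except a trailing single-element run
theorem pv_gaps_eq (m : List Int) (hs : m.Pairwise (· < ·)) :
    ∀ index, pvA_gaps m index = pvB_trim (pvRunsOf (m.drop index)) := by
  have main : ∀ (n : Nat) (index : Nat), m.length - index ≤ n →
      pvA_gaps m index = pvB_trim (pvRunsOf (m.drop index)) := by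
    intro n
    induction n with
    | zero =>
      intro index hn
      rw [pvA_gaps, dif_neg (by omega), List.drop_eq_nil_of_le (by omega)]
      rfl
    | succ n ih =>
      intro index hn
      by_cases h : index + 1 < m.length
      · rw [pvA_gaps, dif_pos h]
        obtain ⟨hL1, hLlen, hLrun, hLterm⟩ := pv_offset_spec m hs index (by omega)
        set low := m.getD index 0 with hlowdef
        set L := pvA_offset m index low 0 with hLdef
        have hL2 : (1:Int) ≤ (L:Int) := by exact_mod_cast hL1
        have hsplit : m.drop index = PySem.List.pyRange low (low + L) ++ m.drop (index + L) := by
          conv_lhs => rw [← List.take_append_drop L (m.drop index)]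
          congr 1
          · apply List.ext_getElem
            · simp only [List.length_take, List.length_drop, PySem.List.length_pyRange_one]
              omega
            · intro k hk1 hk2
              rw [List.getElem_take, List.getElem_drop, PySem.List.getElem_pyRange_one]
              have hkL : k < L := by
                simp only [List.length_take, List.length_drop] at hk1
                omega
              have hk := hLrun k hkL
              rw [List.getD_eq_getElem _ _ (by omega)] at hk
              exact hk
          · rw [List.drop_drop]
        have hrest_head : ∀ y ∈ (m.drop (index + L)).head?, low + L < y := by
          intro y hy
          rw [List.head?_drop] at hy
          have hlt : index + L < m.length := by
            by_contra hc
            rw [List.getElem?_eq_none (by omega)] at hy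
            simp at hy
          rcases hLterm with ht | ht
          · omega
          · rw [List.getElem?_eq_getElem hlt] at hy
            have hyy : m[index + L] = y := by injection hy
            rw [List.getD_eq_getElem _ _ hlt, hyy] at ht
            exact ht
        have hrw : pvRunsOf (m.drop index) =
            (low, low + L - 1) :: pvRunsOf (m.drop (index + L)) := by
          rw [hsplit, PySem.List.pyRange_one_cons (by omega), List.cons_append]
          show pvRunsGo low low _ = _
          have hr1 : PySem.List.pyRange (low + 1) (low + L) =
              PySem.List.pyRange (low + 1) ((low + L - 1) + 1) := by norm_num
          rw [hr1, pv_runsGo_consec _ low low (low + L - 1) (by omega)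
            (fun y hy => by have := hrest_head y hy; omega)]
        have hgd : m.getD (index + L - 1) 0 = low + L - 1 := by
          have hj := hLrun (L - 1) (by omega)
          have hidx : index + L - 1 = index + (L - 1) := by omega
          rw [hidx, hj]
          have : ((L - 1 : Nat) : Int) = (L : Int) - 1 := by omega
          rw [this]
          ring
        rw [hgd, hrw]
        by_cases hrest : index + L < m.length
        · have hne : m.drop (index + L) ≠ [] := by
            apply List.ne_nil_of_length_pos
            rw [List.length_drop]
            omega
          rw [pv_trim_cons _ _ (pv_runsOf_ne_nil _ hne), ih (index + L) (by omega)]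
        · have hnil : m.drop (index + L) = [] := List.drop_eq_nil_of_le (by omega)
          have hLbig : (2:Nat) ≤ L := by omega
          rw [hnil, pvA_gaps, dif_neg (by omega)]
          have hne2 : low ≠ low + (L:Int) - 1 := by
            have : (2:Int) ≤ (L:Int) := by exact_mod_cast hLbig
            omega
          simp [pvB_trim, pvRunsOf, hne2]
      · rw [pvA_gaps, dif_neg h]
        by_cases hl : index < m.length
        · have hlen1 : (m.drop index).length = 1 := by
            rw [List.length_drop]
            omega
          obtain ⟨x, hx⟩ := List.length_eq_one_iff.mp hlen1
          rw [hx]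
          simp [pvRunsOf, pvRunsGo, pvB_trim]
        · rw [List.drop_eq_nil_of_le (by omega)]
          rfl
  intro index
  exact main m.length index (by omega)

theorem pv_runs_cons₂ (x y : Int) (l : List Int) :
    pvB_runs (x :: y :: l) =
      (if 2 ≤ y - x then [(x + 1, y - 1)] else []) ++ pvB_runs (y :: l) := by
  show pvB_runs (x :: y :: l) = _
  unfold pvB_runs
  simp only [List.tail_cons, List.zip_cons_cons, List.filter_cons]
  by_cases hxy : 2 ≤ y - x <;> simp [hxy]

-- duality: the gap runs computed from the present ids are the runs of the missing numbers
theorem pv_bounds_runs (ex : List Int) :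
    ∀ (ids : List Int) (p q : Int), ids.Pairwise (· < ·) → (∀ i ∈ ids, p < i ∧ i < q) →
    (∀ k, p < k → k < q → (k ∈ ids ↔ ex.contains k = true)) →
    pvB_runs (p :: ids ++ [q]) =
      pvRunsOf ((PySem.List.pyRange (p + 1) q).filter (fun k => !ex.contains k)) := by
  intro ids
  induction ids with
  | nil =>
    intro p q _ _ hmem
    have hfull : (PySem.List.pyRange (p + 1) q).filter (fun k => !ex.contains k)
        = PySem.List.pyRange (p + 1) q := by
      rw [List.filter_eq_self]
      intro a ha
      have hb := PySem.List.mem_pyRange_one.mp ha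
      have h2 := hmem a (by omega) (by omega)
      simp only [List.not_mem_nil, false_iff] at h2
      simpa using h2
    rw [hfull]
    have h0 : pvB_runs ([q] : List Int) = [] := rfl
    rw [show (p :: ([] : List Int) ++ [q]) = p :: q :: [] from rfl, pv_runs_cons₂, h0]
    by_cases hpq : 2 ≤ q - p
    · rw [if_pos hpq, pv_runsOf_range (p + 1) q (by omega)]
      simp
    · rw [if_neg hpq, PySem.List.pyRange_one_eq_nil (by omega)]
      rfl
  | cons i rest ih =>
    intro p q hpair hbounds hmem
    have hip := hbounds i List.mem_cons_self
    have hpairrest := List.Pairwise.of_cons hpair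
    have hi_lt : ∀ x ∈ rest, i < x := (List.pairwise_cons.mp hpair).1
    rw [show (p :: (i :: rest) ++ [q]) = p :: i :: (rest ++ [q]) from rfl, pv_runs_cons₂]
    have hih : pvB_runs (i :: (rest ++ [q])) =
        pvRunsOf ((PySem.List.pyRange (i + 1) q).filter (fun k => !ex.contains k)) := by
      refine ih i q hpairrest (fun x hx => ⟨hi_lt x hx, (hbounds x (by simp [hx])).2⟩) ?_
      intro k hk1 hk2
      rw [← hmem k (by omega) hk2]
      constructor
      · intro hk; simp [hk]
      · intro hk
        rcases List.mem_cons.mp hk with h' | h'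
        · omega
        · exact h'
    have hsplit : PySem.List.pyRange (p + 1) q =
        (PySem.List.pyRange (p + 1) i ++ [i]) ++ PySem.List.pyRange (i + 1) q := by
      rw [← PySem.List.pyRange_one_succ_right (by omega), ←
        PySem.List.pyRange_one_append (p + 1) (i + 1) q (by omega) (by omega)]
    have hconti : ex.contains i = true := by
      rw [← hmem i hip.1 hip.2]
      exact List.mem_cons_self
    have hfill : (PySem.List.pyRange (p + 1) i).filter (fun k => !ex.contains k)
        = PySem.List.pyRange (p + 1) i := by
      rw [List.filter_eq_self]
      intro a ha
      have hb := PySem.List.mem_pyRange_one.mp ha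
      have h2 : ¬ (a ∈ i :: rest) := by
        intro hc
        rcases List.mem_cons.mp hc with h' | h'
        · omega
        · have := hi_lt a h'; omega
      rw [hmem a (by omega) (by omega)] at h2
      simpa using h2
    rw [hsplit, List.filter_append, List.filter_append, hfill]
    have hfi : ([i] : List Int).filter (fun k => !ex.contains k) = [] := by
      have hmi : i ∈ ex := by simpa using hconti
      simp [hmi]
    rw [hfi, List.append_nil]
    set M' := (PySem.List.pyRange (i + 1) q).filter (fun k => !ex.contains k) with hM'
    have hM'mem : ∀ y ∈ M', i + 1 ≤ y ∧ y < q := by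
      intro y hy
      exact PySem.List.mem_pyRange_one.mp (List.mem_of_mem_filter hy)
    by_cases hpi : 2 ≤ i - p
    · rw [if_pos hpi, PySem.List.pyRange_one_cons (by omega : p + 1 < i), List.cons_append,
        List.cons_append, pv_runsOf_cons]
      have hr1 : PySem.List.pyRange (p + 1 + 1) i
          = PySem.List.pyRange ((p + 1) + 1) ((i - 1) + 1) := by norm_num
      rw [hr1, pv_runsGo_consec M' (p + 1) (p + 1) (i - 1) (by omega)
        (fun y hy => by
          have := hM'mem y (List.mem_of_mem_head? hy)
          omega)]
      rw [hih]
      simp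
    · rw [if_neg hpi, PySem.List.pyRange_one_eq_nil (by omega : i ≤ p + 1),
        List.nil_append, List.nil_append]
      exact hih

theorem pv_runsGo_prop (m : List Int) :
    ∀ (xs : List Int) (a b : Int), a ≤ b → (∀ x ∈ xs, x ∈ m) →
    (∀ j, a ≤ j → j ≤ b → j ∈ m) →
    ∀ r ∈ pvRunsGo a b xs, r.1 ≤ r.2 ∧ ∀ j, r.1 ≤ j → j ≤ r.2 → j ∈ m := by
  intro xs
  induction xs with
  | nil =>
    intro a b hab _ hint r hr
    simp only [pvRunsGo, List.mem_singleton] at hr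
    subst hr
    exact ⟨hab, hint⟩
  | cons y ys ih =>
    intro a b hab hxs hint r hr
    simp only [pvRunsGo] at hr
    by_cases hy : y = b + 1
    · rw [if_pos hy] at hr
      refine ih a y (by omega) (fun x hx => hxs x (by simp [hx])) ?_ r hr
      intro j hj1 hj2
      by_cases hjb : j ≤ b
      · exact hint j hj1 hjb
      · have : j = y := by omega
        exact this ▸ hxs y (by simp)
    · rw [if_neg hy] at hr
      rcases List.mem_cons.mp hr with h | h
      · subst h; exact ⟨hab, hint⟩
      · refine ih y y le_rfl (fun x hx => hxs x (by simp [hx])) ?_ r h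
        intro j hj1 hj2
        have : j = y := by omega
        exact this ▸ hxs y (by simp)

theorem pv_runsOf_prop (m : List Int) :
    ∀ r ∈ pvRunsOf m, r.1 ≤ r.2 ∧ ∀ j, r.1 ≤ j → j ≤ r.2 → j ∈ m := by
  cases m with
  | nil => intro r hr; simp [pvRunsOf] at hr
  | cons x t =>
    exact pv_runsGo_prop (x :: t) t x x le_rfl (fun y hy => by simp [hy])
      (fun j h1 h2 => by rw [show j = x from by omega]; simp)

theorem pv_runsGo_headstruct : ∀ (xs : List Int) (a c : Int),
    ∃ b' t, pvRunsGo a c xs = (a, b') :: t ∧ c ≤ b' := by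
  intro xs
  induction xs with
  | nil => intro a c; exact ⟨c, [], rfl, le_rfl⟩
  | cons y ys ih =>
    intro a c
    by_cases hy : y = c + 1
    · obtain ⟨b', t, hbt, hcb⟩ := ih a y
      refine ⟨b', t, ?_, by omega⟩
      simp only [pvRunsGo, if_pos hy]
      exact hbt
    · exact ⟨c, pvRunsGo y y ys, by simp only [pvRunsGo, if_neg hy], le_rfl⟩

-- the last run's upper end bounds every element of m
theorem pv_runsGo_last_snd (m : List Int) : ∀ (xs : List Int) (a c : Int),
    (c :: xs).Pairwise (· < ·) → (∀ z ∈ m, z ≤ c ∨ z ∈ xs) →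
    ∀ r, (pvRunsGo a c xs).getLast? = some r → ∀ z ∈ m, z ≤ r.2 := by
  intro xs
  induction xs with
  | nil =>
    intro a c _ hz r hr z hzm
    simp only [pvRunsGo, List.getLast?_singleton, Option.some.injEq] at hr
    subst hr
    rcases hz z hzm with h | h
    · exact h
    · simp at h
  | cons y ys ih =>
    intro a c hp hz r hr z hzm
    have hcy : c < y := (List.pairwise_cons.mp hp).1 y List.mem_cons_self
    have hpt : (y :: ys).Pairwise (· < ·) := (List.pairwise_cons.mp hp).2
    have hz' : ∀ w ∈ m, w ≤ y ∨ w ∈ ys := by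
      intro w hw
      rcases hz w hw with h | h
      · left; omega
      · rcases List.mem_cons.mp h with h' | h'
        · left; omega
        · right; exact h'
    by_cases hy : y = c + 1
    · simp only [pvRunsGo, if_pos hy] at hr
      exact ih a y hpt hz' r hr z hzm
    · simp only [pvRunsGo, if_neg hy] at hr
      obtain ⟨b', t, hbt, _⟩ := pv_runsGo_headstruct ys y y
      rw [hbt, List.getLast?_cons_cons, ← hbt] at hr
      exact ih y y hpt hz' r hr z hzm

-- the predecessor of a run's lower end is never an element of m
theorem pv_runsGo_fst_pred (m : List Int) : ∀ (xs : List Int) (a c : Int),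
    (c :: xs).Pairwise (· < ·) →
    (a - 1) ∉ m → (∀ z ∈ m, z ≤ c ∨ z ∈ xs) →
    ∀ r ∈ pvRunsGo a c xs, r.1 - 1 ∉ m := by
  intro xs
  induction xs with
  | nil =>
    intro a c _ ha _ r hr
    simp only [pvRunsGo, List.mem_singleton] at hr
    subst hr
    exact ha
  | cons y ys ih =>
    intro a c hp ha hz r hr
    have hcy : c < y := (List.pairwise_cons.mp hp).1 y List.mem_cons_self
    have hys : ∀ w ∈ ys, y < w := (List.pairwise_cons.mp (List.pairwise_cons.mp hp).2).1
    have hpt : (y :: ys).Pairwise (· < ·) := (List.pairwise_cons.mp hp).2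
    have hz' : ∀ w ∈ m, w ≤ y ∨ w ∈ ys := by
      intro w hw
      rcases hz w hw with h | h
      · left; omega
      · rcases List.mem_cons.mp h with h' | h'
        · left; omega
        · right; exact h'
    by_cases hy : y = c + 1
    · simp only [pvRunsGo, if_pos hy] at hr
      exact ih a y hpt ha hz' r hr
    · simp only [pvRunsGo, if_neg hy] at hr
      rcases List.mem_cons.mp hr with h | h
      · subst h; exact ha
      · refine ih y y hpt ?_ hz' r h
        intro hmem
        rcases hz (y - 1) hmem with h' | h'
        · omega
        · rcases List.mem_cons.mp h' with h'' | h''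
          · omega
          · have := hys _ h''; omega

-- closed form of the inner while loop for page_size ≥ 2
theorem pv_inner_eq (ps : Int) (h2 : 2 ≤ ps) :
    ∀ (n : Nat) (b c : Int) (pgs : List Int), 0 ≤ c → (b - c * ps).toNat ≤ n →
    pvA_inner ps b pgs (c * ps) c =
      (pgs ++ PySem.List.pyRange (c + 1) (max c (-(PySem.Int.floordiv (-b) ps)) + 1),
        max c (-(PySem.Int.floordiv (-b) ps)) * ps,
        max c (-(PySem.Int.floordiv (-b) ps))) := by
  have hps : (0:Int) < ps := by omega
  intro n
  induction n with
  | zero =>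
    intro b c pgs hc hn
    have hQ := (PySem.Int.neg_floordiv_neg_eq_iff_of_pos (a := b) hps).mp rfl
    have hble : b ≤ c * ps := by omega
    have hQc : -(PySem.Int.floordiv (-b) ps) ≤ c := by
      by_contra hcon
      have h1 : c ≤ -(PySem.Int.floordiv (-b) ps) - 1 := by omega
      have := mul_le_mul_of_nonneg_right h1 (by omega : (0:Int) ≤ ps)
      omega
    rw [pvA_inner, dif_neg (by omega), max_eq_left hQc,
      PySem.List.pyRange_one_eq_nil (by omega), List.append_nil]
  | succ n ih =>
    intro b c pgs hc hn
    have hQ := (PySem.Int.neg_floordiv_neg_eq_iff_of_pos (a := b) hps).mp rfl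
    by_cases hble : b ≤ c * ps
    · have hQc : -(PySem.Int.floordiv (-b) ps) ≤ c := by
        by_contra hcon
        have h1 : c ≤ -(PySem.Int.floordiv (-b) ps) - 1 := by omega
        have := mul_le_mul_of_nonneg_right h1 (by omega : (0:Int) ≤ ps)
        omega
      rw [pvA_inner, dif_neg (by omega), max_eq_left hQc,
        PySem.List.pyRange_one_eq_nil (by omega), List.append_nil]
    · have hcQ : c < -(PySem.Int.floordiv (-b) ps) := by
        by_contra hcon
        have h1 : -(PySem.Int.floordiv (-b) ps) ≤ c := by omega
        have := mul_le_mul_of_nonneg_right h1 (by omega : (0:Int) ≤ ps)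
        omega
      rw [pvA_inner, dif_pos ⟨by omega, hps⟩]
      have h0 : (0:Int) ≤ c * ps := mul_nonneg hc (by omega)
      have hfd : PySem.Int.floordiv (c * ps + 1) ps = c :=
        (PySem.Int.floordiv_eq_iff_of_pos hps).mpr
          ⟨by omega, by
            have h9 : (c + 1) * ps = c * ps + ps := by ring
            omega⟩
      have htd : PySem.Int.truncdiv (c * ps + 1) ps + 1 = c + 1 := by
        rw [pv_tdiv_eq _ _ (by omega) hps, hfd]
      have hstep : c * ps + ps = (c + 1) * ps := by ring
      rw [htd, hstep, ih b (c + 1) (pgs ++ [c + 1]) (by omega) (by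
        have h1 : (c + 1) * ps = c * ps + ps := by ring
        omega)]
      have hm1 : max c (-PySem.Int.floordiv (-b) ps) = -PySem.Int.floordiv (-b) ps :=
        max_eq_right (by omega)
      have hm2 : max (c + 1) (-PySem.Int.floordiv (-b) ps) = -PySem.Int.floordiv (-b) ps :=
        max_eq_right (by omega)
      rw [hm1, hm2, PySem.List.pyRange_one_cons
        (show c + 1 < -PySem.Int.floordiv (-b) ps + 1 by omega)]
      simp

-- for a single-issue gap the inner loop does not run at all (any page_size ≥ 1)
theorem pv_inner_singleton (ps b p0 : Int) (hps : 0 < ps) (pgs : List Int)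
    (h : b ≤ p0 * ps) :
    pvA_inner ps b pgs (p0 * ps) p0 = (pgs, p0 * ps, p0) := by
  rw [pvA_inner, dif_neg (by omega)]

theorem pv_fold_eq (ps : Int) (hps : 1 ≤ ps) :
    ∀ (gaps : List (Int × Int)) (pgs : List Int) (lp : Int), 0 ≤ lp →
    (∀ r ∈ gaps, 1 ≤ r.1 ∧ r.1 ≤ r.2 ∧ (r.1 = r.2 ∨ 2 ≤ ps)) →
    pvA_fold ps gaps pgs (lp * ps) lp = pvB_emit ps gaps pgs lp := by
  intro gaps
  induction gaps with
  | nil => intro pgs lp _ _; rfl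
  | cons g rest ih =>
    obtain ⟨a, b⟩ := g
    intro pgs lp hlp hr
    obtain ⟨ha1, hab, hsp⟩ := hr (a, b) List.mem_cons_self
    dsimp only at ha1 hab hsp
    have hrest := fun r hr' => hr r (List.mem_cons_of_mem _ hr')
    have hps' : (0:Int) < ps := by omega
    have htd : PySem.Int.truncdiv (a - 1) ps = PySem.Int.floordiv (a - 1) ps :=
      pv_tdiv_eq _ _ (by omega) hps'
    have hfd0 : 0 ≤ PySem.Int.floordiv (a - 1) ps :=
      (PySem.Int.le_floordiv_iff_mul_le hps').mpr (by omega)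
    simp only [pvA_fold, pvB_emit, htd]
    by_cases hlt : PySem.Int.floordiv (a - 1) ps + 1 < lp
    · rw [if_pos hlt, if_pos hlt]
      exact ih pgs lp hlp hrest
    · rw [if_neg hlt, if_neg hlt]
      have hfp : (if lp ≥ PySem.Int.floordiv (a - 1) ps + 1 then lp + 1
          else PySem.Int.floordiv (a - 1) ps + 1)
          = (if PySem.Int.floordiv (a - 1) ps + 1 = lp then lp + 1
          else PySem.Int.floordiv (a - 1) ps + 1) := by
        split_ifs <;> omega
      rw [hfp]
      set P := (if PySem.Int.floordiv (a - 1) ps + 1 = lp then lp + 1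
          else PySem.Int.floordiv (a - 1) ps + 1) with hPdef
      have hPge : PySem.Int.floordiv (a - 1) ps + 1 ≤ P := by
        rw [hPdef]; split_ifs <;> omega
      have hP0 : 0 ≤ P := by omega
      have haP : a ≤ P * ps := by
        have h1 := PySem.Int.floordiv_mul_add_mod (a - 1) ps
        have h2 := PySem.Int.mod_lt (a - 1) hps'
        have h3 := mul_le_mul_of_nonneg_right hPge (by omega : (0:Int) ≤ ps)
        have h4 : (PySem.Int.floordiv (a - 1) ps + 1) * ps
            = PySem.Int.floordiv (a - 1) ps * ps + ps := by ring
        omega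
      have hQb := (PySem.Int.neg_floordiv_neg_eq_iff_of_pos (a := b) hps').mp rfl
      rcases hsp with heq | h2
      · subst heq
        rw [pv_inner_singleton ps a P hps' (pgs ++ [P]) haP]
        have hQP : -PySem.Int.floordiv (-a) ps ≤ P := by
          by_contra hcon
          have h5 : P ≤ -PySem.Int.floordiv (-a) ps - 1 := by omega
          have := mul_le_mul_of_nonneg_right h5 (by omega : (0:Int) ≤ ps)
          omega
        rw [max_eq_left hQP, PySem.List.pyRange_one_singleton]
        exact ih (pgs ++ [P]) P hP0 hrest
      · rw [pv_inner_eq ps h2 ((b - P * ps).toNat) b P (pgs ++ [P]) hP0 le_rfl]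
        have hPQ : P ≤ max P (-PySem.Int.floordiv (-b) ps) := le_max_left _ _
        rw [PySem.List.pyRange_one_cons
          (show P < max P (-PySem.Int.floordiv (-b) ps) + 1 by omega)]
        have hlist : (pgs ++ [P]) ++ PySem.List.pyRange (P + 1)
              (max P (-PySem.Int.floordiv (-b) ps) + 1)
            = pgs ++ (P :: PySem.List.pyRange (P + 1)
              (max P (-PySem.Int.floordiv (-b) ps) + 1)) := by simp
        rw [hlist]
        exact ih _ (max P (-PySem.Int.floordiv (-b) ps)) (by omega) hrest

theorem pv_runs_eq_runsOf (ex : List Int) : pvB_runs (0 :: PySem.List.sorted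
      (PySem.Set.ofList (ex.filter (fun x => 1 ≤ x && x < PySem.List.pyGetD ex (-1) 0)))
      (fun x => x) ++ [PySem.List.pyGetD ex (-1) 0]) = pvRunsOf (pvMissing ex) := by
    have hmemids : ∀ k : Int, k ∈ PySem.List.sorted
        (PySem.Set.ofList (ex.filter (fun x => 1 ≤ x && x < PySem.List.pyGetD ex (-1) 0)))
        (fun x => x) ↔ k ∈ ex ∧ 1 ≤ k ∧ k < PySem.List.pyGetD ex (-1) 0 := by
      intro k
      rw [PySem.List.mem_sorted, PySem.Set.mem_ofList, List.mem_filter]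
      simp
    have h := pv_bounds_runs ex (PySem.List.sorted
        (PySem.Set.ofList (ex.filter (fun x => 1 ≤ x && x < PySem.List.pyGetD ex (-1) 0)))
        (fun x => x)) 0 (PySem.List.pyGetD ex (-1) 0)
      (PySem.List.sorted_ofList_pairwise_lt _)
      (fun i hi => by
        have := (hmemids i).mp hi
        omega)
      (fun k hk1 hk2 => by
        rw [hmemids k]
        constructor
        · intro hk
          simpa using hk.1
        · intro hk
          exact ⟨by simpa using hk, by omega, hk2⟩)
    rw [h]
    unfold pvMissing
    norm_num

-- outside the trailing-singleton part of D_, find_gaps_iter's trim is the identity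
theorem pv_trim_id (ex : List Int)
    (hnd2 : ¬ ∃ u ∈ (0 :: ex), 0 ≤ u ∧
      u + 1 < ex.getLast?.getD 0 ∧ u + 1 ∉ ex ∧
      ¬ ∃ v ∈ (((u + 1) : Int) :: ex), u + 1 ≤ v ∧
        v + 1 < ex.getLast?.getD 0 ∧ v + 1 ∉ ex) :
    pvB_trim (pvRunsOf (pvMissing ex)) = pvRunsOf (pvMissing ex) := by
  set M := pvMissing ex with hM
  unfold pvB_trim
  cases hlast : (pvRunsOf M).getLast? with
  | none => rfl
  | some r =>
    dsimp only
    by_cases hr12 : r.1 = r.2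
    · exfalso
      apply hnd2
      have hMne : M ≠ [] := by
        intro h
        rw [h] at hlast
        simp [pvRunsOf] at hlast
      obtain ⟨x, t, hxt⟩ := List.exists_cons_of_ne_nil hMne
      have hMs : M.Pairwise (· < ·) := pv_missing_sorted ex
      have hps : (x :: t).Pairwise (· < ·) := hxt ▸ hMs
      have hlast' : (pvRunsGo x x t).getLast? = some r := by
        rw [← pv_runsOf_cons, ← hxt]
        exact hlast
      have hzinit : ∀ z ∈ M, z ≤ x ∨ z ∈ t := by
        intro z hz
        rw [hxt] at hz
        rcases List.mem_cons.mp hz with h | h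
        · left; omega
        · right; exact h
      have hmax : ∀ z ∈ M, z ≤ r.2 :=
        pv_runsGo_last_snd M t x x hps hzinit r hlast'
      have hrmem : r ∈ pvRunsOf M := by
        have : (pvRunsOf M).getLast? = some r := hlast
        rw [List.getLast?_eq_some_iff] at this
        obtain ⟨l', hl'⟩ := this
        rw [hl']
        simp
      have hpred : r.1 - 1 ∉ M := by
        refine pv_runsGo_fst_pred M t x x hps ?_ hzinit r
          (by rw [hxt, pv_runsOf_cons] at hrmem; exact hrmem)
        intro hmem
        rw [hxt] at hmem
        rcases List.mem_cons.mp hmem with h | h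
        · omega
        · have := (List.pairwise_cons.mp hps).1 _ h
          omega
      obtain ⟨_, hint⟩ := pv_runsOf_prop M r hrmem
      have hq : r.2 ∈ M := hint r.2 (by omega) le_rfl
      have hqM : 1 ≤ r.2 ∧ r.2 < ex.getLast?.getD 0 ∧ r.2 ∉ ex := by
        rw [hM] at hq
        unfold pvMissing at hq
        rw [List.mem_filter, PySem.List.mem_pyRange_one, pv_last_eq] at hq
        exact ⟨hq.1.1, hq.1.2, by simpa using hq.2⟩
      set L := ex.getLast?.getD 0 with hLdef
      refine ⟨r.2 - 1, ?_, by omega, by omega, ?_, ?_⟩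
      · by_cases h1 : r.2 = 1
        · exact List.mem_cons.mpr (Or.inl (by omega))
        · refine List.mem_cons.mpr (Or.inr ?_)
          by_contra hc
          refine hpred ?_
          rw [hr12, hM]
          unfold pvMissing
          rw [List.mem_filter, PySem.List.mem_pyRange_one, pv_last_eq]
          exact ⟨⟨by omega, by omega⟩, by simpa using hc⟩
      · have e : r.2 - 1 + 1 = r.2 := by omega
        rw [e]
        exact hqM.2.2
      · rintro ⟨v, hvmem, hv1, hv2, hv3⟩
        have hvM : v + 1 ∈ M := by
          rw [hM]
          unfold pvMissing
          rw [List.mem_filter, PySem.List.mem_pyRange_one, pv_last_eq]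
          exact ⟨⟨by omega, by omega⟩, by simpa using hv3⟩
        have := hmax _ hvM
        omega
    · rw [if_neg hr12]

-- ===== VERDICT (by name: the statement is the Claim_ definition above) =====
theorem get_missing_issue_pages_spec : Claim_unchanged_get_missing_issue_pages := by
  intro ex ps _hdom hpre
  unfold Spec_get_missing_issue_pages
  intro hnd
  obtain ⟨hne, hps⟩ := hpre
  unfold D_get_missing_issue_pages at hnd
  obtain ⟨hnd1, hnd2⟩ := not_or.mp hnd
  have hMs : (pvMissing ex).Pairwise (· < ·) := pv_missing_sorted ex
  have hgaps : pvA_gaps (pvMissing ex) 0 = pvB_trim (pvRunsOf (pvMissing ex)) := by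
    have := pv_gaps_eq (pvMissing ex) hMs 0
    rwa [List.drop_zero] at this
  have hruns := pv_runs_eq_runsOf ex
  have hpredAll : ∀ r ∈ pvRunsOf (pvMissing ex), r.1 - 1 ∉ pvMissing ex := by
    cases hMx : pvMissing ex with
    | nil =>
      intro r hr
      simp [pvRunsOf] at hr
    | cons x t =>
      intro r hr
      rw [pv_runsOf_cons] at hr
      have hpsx : (x :: t).Pairwise (· < ·) := hMx ▸ hMs
      refine pv_runsGo_fst_pred (x :: t) t x x hpsx ?_ ?_ r hr
      · intro hmem
        rcases List.mem_cons.mp hmem with h | h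
        · omega
        · have := (List.pairwise_cons.mp hpsx).1 _ h
          omega
      · intro z hz
        rcases List.mem_cons.mp hz with h | h
        · left; omega
        · right; exact h
  have hcond : ∀ r ∈ pvRunsOf (pvMissing ex),
      1 ≤ r.1 ∧ r.1 ≤ r.2 ∧ (r.1 = r.2 ∨ 2 ≤ ps) := by
    intro r hrr
    obtain ⟨hab, hint⟩ := pv_runsOf_prop (pvMissing ex) r hrr
    refine ⟨pv_missing_one_le ex r.1 (hint r.1 le_rfl hab), hab, ?_⟩
    by_cases h2 : 2 ≤ ps
    · right; exact h2
    · left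
      by_contra hne12
      have hm1 := hint r.1 le_rfl (by omega)
      have hm2 := hint (r.1 + 1) (by omega) (by omega)
      simp only [pvMissing, List.mem_filter, PySem.List.mem_pyRange_one, Bool.not_eq_true',
        pv_last_eq] at hm1 hm2
      apply hnd1
      refine ⟨by omega, r.1 - 1, ?_, by omega, by omega, ?_, ?_⟩
      · by_cases h1 : r.1 = 1
        · exact List.mem_cons.mpr (Or.inl (by omega))
        · refine List.mem_cons.mpr (Or.inr ?_)
          by_contra hc
          refine hpredAll r hrr ?_
          unfold pvMissing
          rw [List.mem_filter, PySem.List.mem_pyRange_one, pv_last_eq]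
          exact ⟨⟨by omega, by omega⟩, by simpa using hc⟩
      · have e : r.1 - 1 + 1 = r.1 := by omega
        rw [e]
        simpa using hm1.2
      · have e : r.1 - 1 + 2 = r.1 + 1 := by omega
        rw [e]
        simpa using hm2.2
  show pvA_fold ps (pvA_gaps (pvA_missing ex) 0) [] 0 0
      = pvB_emit ps (pvB_runs _) [] 0
  rw [pv_missing_eq ex, hgaps, hruns, pv_trim_id ex hnd2]
  have := pv_fold_eq ps hps (pvRunsOf (pvMissing ex)) [] 0 le_rfl hcond
  rwa [zero_mul] at this

theorem get_missing_issue_pages_changed : Claim_changed_get_missing_issue_pages := by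
  unfold Claim_changed_get_missing_issue_pages
  refine ⟨by decide, by decide, by decide, ?_, by decide, by decide⟩
  show get_missing_issue_pages [1, 4] 1 = [2, 4]
  have hm : pvA_missing [1, 4] = [2, 3] := by decide
  have hoff : pvA_offset [2, 3] 0 (List.getD [2, 3] 0 0) 0 = 2 := by
    rw [pvA_offset, dif_pos (by decide), pvA_offset, dif_pos (by decide),
      pvA_offset, dif_neg (by decide)]
  have hg : pvA_gaps [2, 3] 0 = [(2, 3)] := by
    rw [pvA_gaps, dif_pos (by decide), hoff, pvA_gaps, dif_neg (by decide)]
    decide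
  have hi : pvA_inner 1 3 ([] ++ [2]) (2 * 1) 2 = ([2, 4], 3, 4) := by
    rw [pvA_inner, dif_pos (by decide), pvA_inner, dif_neg (by decide)]
    decide
  show pvA_fold 1 (pvA_gaps (pvA_missing [1, 4]) 0) [] 0 0 = [2, 4]
  rw [hm, hg]
  simp only [pvA_fold]
  rw [if_neg (by decide)]
  have h2 : ((if (0:Int) ≥ PySem.Int.truncdiv (2 - 1) 1 + 1 then (0:Int) + 1
      else PySem.Int.truncdiv (2 - 1) 1 + 1)) = 2 := by decide
  simp only [h2, hi]
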